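-- pv_equiv track=rewrite | github.com/andreachirico11/python-exercises | course/various/5-reverse-int.py | array_adder
-- ===== SOURCE A (Python) =====
-- def remove_zeros(n):
--     while True:
--         if n < 10:
--             break
--         n = n // 10
--     return n
--
-- def array_adder(prev_arr, num):
--     if len(prev_arr) == 0:
--         prev_arr.append(num)
--         return prev_arr
--     for n in prev_arr:
--         num -= n
--     prev_arr.append(remove_zeros(num))
--     return prev_arr
-- ===== SOURCE B (Python) =====
-- def array_adder(prev_arr, num):
--     if not prev_arr:
--         prev_arr.append(num)
--         return prev_arr
--     num -= sum(prev_arr)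
--     prev_arr.append(num if num < 10 else int(str(num)[0]))
--     return prev_arr
-- ===== Notes on version B (the rewrite author's own statement) =====
-- stated objective: idiomatic
-- what changed: B replaces the element-by-element subtraction loop with sum() and replaces remove_zeros's repeated floor-division loop by extracting the leading decimal digit from the number's string representation (int(str(num)[0])), keeping the num < 10 guard so small/negative values pass through unchanged.
import Mathlib
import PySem

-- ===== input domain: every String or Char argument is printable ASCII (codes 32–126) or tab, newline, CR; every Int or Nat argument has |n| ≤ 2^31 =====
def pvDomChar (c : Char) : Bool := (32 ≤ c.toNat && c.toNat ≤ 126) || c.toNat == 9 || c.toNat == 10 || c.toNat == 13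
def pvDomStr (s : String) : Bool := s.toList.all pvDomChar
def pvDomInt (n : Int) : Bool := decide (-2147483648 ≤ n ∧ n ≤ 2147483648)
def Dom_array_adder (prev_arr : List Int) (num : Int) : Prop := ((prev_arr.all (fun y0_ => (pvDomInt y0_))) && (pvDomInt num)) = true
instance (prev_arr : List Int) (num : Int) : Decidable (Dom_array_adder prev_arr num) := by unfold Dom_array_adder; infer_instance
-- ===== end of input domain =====

-- B replaces A's element-by-element subtraction loop by sum() and replaces remove_zeros's
-- repeated floor-division loop by taking the leading decimal digit of str(num), keeping the
-- num < 10 guard (objective: idiomatic, same cost). Both A and B mutate prev_arr in place by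
-- appending; the equivalence proved here is about the return value.

-- ===== PORT A =====
def remove_zeros (n : Int) : Int :=
  if _h : n < 10 then n
  else remove_zeros (PySem.Int.floordiv n 10)
termination_by n.toNat
decreasing_by
  simp only [PySem.Int.floordiv, Int.fdiv_eq_ediv]
  omega

def array_adder (prev_arr : List Int) (num : Int) : List Int :=
  if prev_arr.length = 0 then prev_arr ++ [num]
  else
    let num' := prev_arr.foldl (fun acc n => acc - n) num
    prev_arr ++ [remove_zeros num']

-- ===== PORT B =====
def array_adder_alt (prev_arr : List Int) (num : Int) : List Int :=
  if prev_arr.isEmpty then prev_arr ++ [num]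
  else
    let m := num - prev_arr.sum
    prev_arr ++ [if m < 10 then m
      else match PySem.Str.pyGet? (PySem.Int.toStr m) 0 with
        -- int(str(m)[0]): neither the index nor int() can fail here (m ≥ 10),
        -- so the none / non-digit fallbacks below are unreachable
        | some c => (PySem.Int.ofChars? [c]).getD 0
        | none => 0]

-- ===== PRECONDITION & SPEC =====
def Spec_array_adder (prev_arr : List Int) (num : Int) (out : List Int) : Prop := out = array_adder_alt prev_arr num
instance (prev_arr : List Int) (num : Int) (out : List Int) : Decidable (Spec_array_adder prev_arr num out) := by unfold Spec_array_adder; infer_instance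

-- ===== CLAIM (what is proved, stated in full; the proofs are below) =====
def Claim_equal_array_adder : Prop := ∀ (prev_arr : List Int) (num : Int), Dom_array_adder prev_arr num → Spec_array_adder prev_arr num (array_adder prev_arr num)

-- ===== LEMMAS AND PROOFS =====

theorem foldl_sub_eq_sub_sum (l : List Int) (num : Int) :
    l.foldl (fun acc n => acc - n) num = num - l.sum := by
  induction l generalizing num with
  | nil => simp
  | cons x xs ih => simp [List.foldl_cons, ih, List.sum_cons]; ring

-- toDigitsCore only ever conses onto its accumulator
theorem toDigitsCore_acc (b : Nat) (f : Nat) : ∀ (n : Nat) (acc : List Char),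
    Nat.toDigitsCore b f n acc = Nat.toDigitsCore b f n [] ++ acc := by
  induction f with
  | zero => intro n acc; simp [Nat.toDigitsCore]
  | succ f ih =>
    intro n acc
    simp only [Nat.toDigitsCore]
    by_cases h : n / b = 0
    · simp [h]
    · simp only [h, if_false]
      rw [ih (n / b) (_ :: acc), ih (n / b) (_ :: [])]
      simp

-- any sufficiently large fuel computes the same digits
theorem toDigitsCore_fuel (b : Nat) (hb : 2 ≤ b) (f : Nat) : ∀ (f' n : Nat), n < f → n < f' →
    Nat.toDigitsCore b f n [] = Nat.toDigitsCore b f' n [] := by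
  induction f with
  | zero => intro f' n h; omega
  | succ f ih =>
    intro f' n h h'
    cases f' with
    | zero => omega
    | succ f' =>
      simp only [Nat.toDigitsCore]
      by_cases hz : n / b = 0
      · simp [hz]
      · simp only [hz, if_false]
        have hn0 : 0 < n := by
          rcases Nat.eq_zero_or_pos n with h0 | h0
          · subst h0; simp at hz
          · exact h0
        have hnb : n / b < n := Nat.div_lt_self hn0 (by omega)
        rw [toDigitsCore_acc b f, toDigitsCore_acc b f',
            ih f' (n / b) (by omega) (by omega)]

theorem toDigits_step (m : Nat) (h : 10 ≤ m) :
    Nat.toDigits 10 m = Nat.toDigits 10 (m / 10) ++ [Nat.digitChar (m % 10)] := by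
  unfold Nat.toDigits
  have hz : ¬ m / 10 = 0 := by omega
  conv_lhs => rw [Nat.toDigitsCore]
  simp only [hz, if_false]
  rw [toDigitsCore_acc 10 m, toDigitsCore_fuel 10 (by norm_num) m (m / 10 + 1) (m / 10)
    (by omega) (by omega)]

theorem toDigits_small (m : Nat) (h : m < 10) : Nat.toDigits 10 m = [Nat.digitChar m] := by
  unfold Nat.toDigits Nat.toDigitsCore
  have hz : m / 10 = 0 := by omega
  simp [hz, Nat.mod_eq_of_lt h]

theorem toDigits_ne_nil (m : Nat) : Nat.toDigits 10 m ≠ [] := by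
  unfold Nat.toDigits
  rw [Nat.toDigitsCore]
  by_cases hz : m / 10 = 0
  · simp [hz]
  · simp only [hz, if_false]
    rw [toDigitsCore_acc]
    simp

theorem remove_zeros_ten (n : Int) (h : 10 ≤ n) :
    remove_zeros n = remove_zeros (n / 10) := by
  rw [remove_zeros]
  have h1 : ¬ n < 10 := by omega
  have h2 : PySem.Int.floordiv n 10 = n / 10 := by
    simp [PySem.Int.floordiv, Int.fdiv_eq_ediv]
  simp [h1]

theorem remove_zeros_small (n : Int) (h : n < 10) : remove_zeros n = n := by
  rw [remove_zeros]; simp [h]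

theorem remove_zeros_range (k : Nat) : ∀ (n : Int), n.toNat ≤ k → 10 ≤ n →
    1 ≤ remove_zeros n ∧ remove_zeros n < 10 := by
  induction k with
  | zero => intro n hk h; omega
  | succ k ih =>
    intro n hk h
    rw [remove_zeros_ten n h]
    by_cases h10 : 10 ≤ n / 10
    · exact ih (n / 10) (by omega) h10
    · rw [remove_zeros_small _ (by omega)]
      constructor
      · have := Int.le_ediv_iff_mul_le (show (0:Int) < 10 by norm_num) |>.mpr
          (show 1 * 10 ≤ n by omega)
        omega
      · omega

-- the head of the decimal digit string is remove_zeros's result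
theorem head_toDigits (k : Nat) : ∀ (n : Int), n.toNat ≤ k → 10 ≤ n →
    (Nat.toDigits 10 n.toNat).head? = some (Nat.digitChar (remove_zeros n).toNat) := by
  induction k with
  | zero => intro n hk h; omega
  | succ k ih =>
    intro n hk h
    rw [toDigits_step n.toNat (by omega)]
    rw [List.head?_append_of_ne_nil _ (toDigits_ne_nil _)]
    rw [remove_zeros_ten n h]
    have hdiv : (n / 10).toNat = n.toNat / 10 := by omega
    by_cases h10 : 10 ≤ n / 10
    · rw [← hdiv]
      exact ih (n / 10) (by omega) h10
    · rw [remove_zeros_small _ (by omega), ← hdiv, toDigits_small _ (by omega)]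
      simp

theorem digit_ofChars (r : Nat) (h1 : 1 ≤ r) (h2 : r < 10) :
    PySem.Int.ofChars? [Nat.digitChar r] = some (r : Int) := by
  interval_cases r <;> decide

theorem remove_zeros_eq_lead (n : Int) (h : 10 ≤ n) :
    remove_zeros n =
      match PySem.Str.pyGet? (PySem.Int.toStr n) 0 with
      | some c => (PySem.Int.ofChars? [c]).getD 0
      | none => 0 := by
  have hts : (PySem.Int.toStr n).toList = Nat.toDigits 10 n.toNat := by
    simp [PySem.Int.toStr, PySem.Int.toChars, show ¬ n < 0 by omega]
  have hhead := head_toDigits n.toNat n (le_refl _) h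
  have hrange := remove_zeros_range n.toNat n (le_refl _) h
  have hget : PySem.Str.pyGet? (PySem.Int.toStr n) 0 =
      some (Nat.digitChar (remove_zeros n).toNat) := by
    rw [show PySem.Str.pyGet? (PySem.Int.toStr n) 0 =
        PySem.List.pyGet? (PySem.Int.toStr n).toList 0 by
      simp [PySem.Str.pyGet?]]
    rw [hts, PySem.List.pyGet?_zero, ← List.head?_eq_getElem?, hhead]
  rw [hget]
  simp only []
  rw [digit_ofChars (remove_zeros n).toNat (by omega) (by omega)]
  simp; omega

-- ===== VERDICT (by name: the statement is the Claim_ definition above) =====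
theorem array_adder_spec : Claim_equal_array_adder := by
  intro prev_arr num _hdom
  unfold Spec_array_adder array_adder array_adder_alt
  by_cases he : prev_arr = []
  · subst he; simp
  · have h1 : ¬ prev_arr.length = 0 := by simpa using he
    have h2 : ¬ prev_arr.isEmpty := by simpa [List.isEmpty_iff] using he
    simp only [h1, h2, if_false, Bool.false_eq_true]
    congr 1
    rw [foldl_sub_eq_sub_sum]
    set m := num - prev_arr.sum with hm
    by_cases hten : m < 10
    · rw [remove_zeros_small m hten]; simp [hten]
    · rw [remove_zeros_eq_lead m (by omega)]
      simp [hten]
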